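-- pv_equiv track=rewrite | github.com/pypi-data/pypi-mirror-397 | packages/dtu-hpc-cli/dtu_hpc_cli-1.4.1.tar.gz/dtu_hpc_cli-1.4.1/dtu_hpc_cli/history.py | filter_by_string
-- ===== SOURCE A (Python) =====
-- def filter_by_string(history: list[dict], key: str, contains: str | None, equals: str | None) -> list[dict]:
--     if contains is not None:
--         history = [
--             entry for entry in history if entry["config"].get(key) is not None and contains in entry["config"].get(key)
--         ]
--     if equals is not None:
--         history = [
--             entry for entry in history if entry["config"].get(key) is not None and entry["config"].get(key) == equals
--         ]
--     return history
-- ===== SOURCE B (Python) =====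
-- def filter_by_string(history: list[dict], key: str, contains: str | None, equals: str | None) -> list[dict]:
--     if contains is None and equals is None:
--         return history
--     result = []
--     for entry in history:
--         v = entry["config"].get(key)
--         if contains is not None and (v is None or contains not in v):
--             continue
--         if equals is not None and (v is None or v != equals):
--             continue
--         result.append(entry)
--     return result
-- ===== Notes on version B (the rewrite author's own statement) =====
-- stated objective: alternative
-- what changed: Replaces A's two sequential filtering list comprehensions (each calling entry['config'].get(key) twice) by a both-None early return plus one explicit loop that fetches the config value once per entry and tests both conditions in a single pass.
import Mathlib
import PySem

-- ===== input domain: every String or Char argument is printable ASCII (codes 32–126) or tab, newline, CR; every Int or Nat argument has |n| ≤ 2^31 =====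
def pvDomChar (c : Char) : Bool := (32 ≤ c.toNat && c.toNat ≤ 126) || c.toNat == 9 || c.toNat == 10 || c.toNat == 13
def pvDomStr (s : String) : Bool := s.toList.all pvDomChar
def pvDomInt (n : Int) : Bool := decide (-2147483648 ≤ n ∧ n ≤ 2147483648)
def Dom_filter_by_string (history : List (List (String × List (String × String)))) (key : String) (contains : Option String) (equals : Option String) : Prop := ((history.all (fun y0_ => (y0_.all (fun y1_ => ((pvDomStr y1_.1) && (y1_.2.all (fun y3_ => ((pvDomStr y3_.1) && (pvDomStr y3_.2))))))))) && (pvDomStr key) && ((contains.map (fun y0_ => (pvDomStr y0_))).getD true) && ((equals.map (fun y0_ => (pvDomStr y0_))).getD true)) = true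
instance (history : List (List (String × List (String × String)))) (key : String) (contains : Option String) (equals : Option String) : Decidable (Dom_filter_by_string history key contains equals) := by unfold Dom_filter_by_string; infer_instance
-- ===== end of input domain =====

-- B replaces A's two sequential filtering comprehensions by a both-None early return plus one
-- explicit single-pass loop that fetches the config value once per entry (alternative decomposition).

-- ===== PORT A =====
-- entry["config"].get(key); under Pre_ the "config" lookup is some, so getD is never hit
def pvCfgGetA (entry : List (String × List (String × String))) (key : String) : Option String :=
  PySem.Dict.get? (PySem.Dict.mk ((PySem.Dict.get? (PySem.Dict.mk entry) "config").getD [])) key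

def filter_by_string (history : List (List (String × List (String × String)))) (key : String) (contains : Option String) (equals : Option String) : List (List (String × List (String × String))) :=
  let h1 :=
    match contains with
    | none => history
    | some c => history.filter (fun entry =>
        match pvCfgGetA entry key with
        | none => false
        | some _ =>
          match pvCfgGetA entry key with
          | none => false
          | some v => PySem.Str.isIn c v)
  match equals with
  | none => h1
  | some e => h1.filter (fun entry =>
      match pvCfgGetA entry key with
      | none => false
      | some _ =>
        match pvCfgGetA entry key with
        | none => false
        | some v => v == e)

-- ===== PORT B =====
-- B's v = entry["config"].get(key), computed once per entry
def pvCfgGetB (entry : List (String × List (String × String))) (key : String) : Option String :=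
  PySem.Dict.get? (PySem.Dict.mk ((PySem.Dict.get? (PySem.Dict.mk entry) "config").getD [])) key

def filter_by_string_alt (history : List (List (String × List (String × String)))) (key : String) (contains : Option String) (equals : Option String) : List (List (String × List (String × String))) :=
  if contains = none ∧ equals = none then history
  else
    history.foldl (fun result entry =>
      let v := pvCfgGetB entry key
      if (match contains with
          | none => false
          | some c => match v with | none => true | some s => !(PySem.Str.isIn c s)) then result
      else if (match equals with
          | none => false
          | some e => match v with | none => true | some s => s != e) then result
      else result ++ [entry]) []

-- ===== PRECONDITION & SPEC =====
-- Pre_ excludes exactly the inputs where A raises KeyError: a filter actually runs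
-- (contains or equals is not None) while some entry lacks the "config" key.
def Pre_filter_by_string (history : List (List (String × List (String × String)))) (key : String) (contains : Option String) (equals : Option String) : Prop :=
  (contains = none ∧ equals = none) ∨ ∀ entry ∈ history, PySem.Dict.contains (PySem.Dict.mk entry) "config" = true
instance (history : List (List (String × List (String × String)))) (key : String) (contains : Option String) (equals : Option String) : Decidable (Pre_filter_by_string history key contains equals) := by unfold Pre_filter_by_string; infer_instance

def pvWitness_filter_by_string : (List (List (String × List (String × String)))) × String × Option String × Option String :=
  ([[("config", [("queue", "gpu")])], [("config", [])]], "queue", some "gp", none)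

def Spec_filter_by_string (history : List (List (String × List (String × String)))) (key : String) (contains : Option String) (equals : Option String) (out : List (List (String × List (String × String)))) : Prop := out = filter_by_string_alt history key contains equals
instance (history : List (List (String × List (String × String)))) (key : String) (contains : Option String) (equals : Option String) (out : List (List (String × List (String × String)))) : Decidable (Spec_filter_by_string history key contains equals out) := by unfold Spec_filter_by_string; infer_instance

-- ===== CLAIM (what is proved, stated in full; the proofs are below) =====
def Claim_equal_filter_by_string : Prop := ∀ (history : List (List (String × List (String × String)))) (key : String) (contains : Option String) (equals : Option String), Dom_filter_by_string history key contains equals → Pre_filter_by_string history key contains equals → Spec_filter_by_string history key contains equals (filter_by_string history key contains equals)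

-- ===== LEMMAS AND PROOFS =====

theorem pvCfgGetB_eq : pvCfgGetB = pvCfgGetA := rfl

-- B's append-accumulator loop is List.filter of the negated-guard predicate
theorem foldl_keep_eq_filter {α : Type} (p q : α → Bool) (l acc : List α) :
    l.foldl (fun r x => if p x then r else if q x then r else r ++ [x]) acc
      = acc ++ l.filter (fun x => !p x && !q x) := by
  induction l generalizing acc with
  | nil => simp
  | cons a t ih =>
    by_cases hp : p a <;> by_cases hq : q a <;>
      simp [hp, hq, ih, List.append_assoc]

-- the combined keep-predicate of B's single pass
def altPred (key : String) (contains : Option String) (equals : Option String)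
    (entry : List (String × List (String × String))) : Bool :=
  (!(match contains with
     | none => false
     | some c => match pvCfgGetB entry key with | none => true | some s => !(PySem.Str.isIn c s))) &&
  (!(match equals with
     | none => false
     | some e => match pvCfgGetB entry key with | none => true | some s => s != e))

-- the one-pass branch of B, written as a filter
theorem alt_eq_filter (history : List (List (String × List (String × String)))) (key : String)
    (contains : Option String) (equals : Option String)
    (h : ¬ (contains = none ∧ equals = none)) :
    filter_by_string_alt history key contains equals
      = history.filter (altPred key contains equals) := by
  unfold filter_by_string_alt altPred
  rw [if_neg h]
  simp only [foldl_keep_eq_filter, List.nil_append]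

theorem filter_by_string_spec : Claim_equal_filter_by_string := by
  intro history key contains equals _ _
  unfold Spec_filter_by_string filter_by_string
  cases contains with
  | none =>
    cases equals with
    | none => simp [filter_by_string_alt]
    | some e =>
      rw [alt_eq_filter _ _ _ _ (by simp)]
      refine (List.filter_congr ?_).symm
      intro entry _
      unfold altPred
      rw [pvCfgGetB_eq]
      cases pvCfgGetA entry key <;> simp [bne]
  | some c =>
    cases equals with
    | none =>
      rw [alt_eq_filter _ _ _ _ (by simp)]
      refine (List.filter_congr ?_).symm
      intro entry _
      unfold altPred
      rw [pvCfgGetB_eq]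
      cases pvCfgGetA entry key <;> simp
    | some e =>
      rw [alt_eq_filter _ _ _ _ (by simp)]
      simp only [List.filter_filter]
      refine (List.filter_congr ?_).symm
      intro entry _
      unfold altPred
      rw [pvCfgGetB_eq]
      cases pvCfgGetA entry key <;> simp [bne, Bool.and_comm]
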